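-- pv_equiv track=rewrite | github.com/mrconter1/The-Long-Multiplication-Benchmark | answer_generator.py | generate_total_column_contributions
-- ===== SOURCE A (Python) =====
-- def generate_total_column_contributions(intermediate_total_results):
--     max_length = max(len(str(shifted_product)) for results in intermediate_total_results for _, shifted_product in results)
--     total_columns = [0] * max_length
--     total_column_contributions = [[] for _ in range(max_length)]
--
--     for results in intermediate_total_results:
--         for i, (product, shifted_product) in enumerate(results):
--             shifted_str = str(shifted_product).zfill(max_length)[::-1]
--             for j, digit in enumerate(shifted_str):
--                 total_columns[j] += int(digit)
--                 total_column_contributions[j].append(int(digit))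
--
--     return total_column_contributions, total_columns
-- ===== SOURCE B (Python) =====
-- def generate_total_column_contributions(intermediate_total_results):
--     max_length = max(len(str(sp)) for results in intermediate_total_results for _, sp in results)
--     rows = [[int(d) for d in str(sp).zfill(max_length)[::-1]]
--             for results in intermediate_total_results for _, sp in results]
--     cols = [[row[j] for row in rows] for j in range(max_length)]
--     return cols, [sum(col) for col in cols]
-- ===== Notes on version B (the rewrite author's own statement) =====
-- stated objective: simpler
-- what changed: A updates two pre-sized accumulators in place, digit by digit, inside three nested loops; B builds the flat list of reversed zero-filled digit rows once and then reads each column (and its sum) off by index, so the per-index mutation disappears.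
import Mathlib
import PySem

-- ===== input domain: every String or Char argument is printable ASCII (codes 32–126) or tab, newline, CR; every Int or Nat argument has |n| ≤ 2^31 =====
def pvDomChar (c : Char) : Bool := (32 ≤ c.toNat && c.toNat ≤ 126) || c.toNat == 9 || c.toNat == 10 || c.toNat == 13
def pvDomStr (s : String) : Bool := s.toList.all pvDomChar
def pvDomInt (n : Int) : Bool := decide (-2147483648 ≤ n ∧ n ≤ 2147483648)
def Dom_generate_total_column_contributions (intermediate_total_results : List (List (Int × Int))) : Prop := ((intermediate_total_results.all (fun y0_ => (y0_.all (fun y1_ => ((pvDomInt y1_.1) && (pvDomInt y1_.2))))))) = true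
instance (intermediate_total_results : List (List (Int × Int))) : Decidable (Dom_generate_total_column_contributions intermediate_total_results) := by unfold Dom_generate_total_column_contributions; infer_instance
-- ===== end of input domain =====

-- B replaces A's in-place per-digit updates of two pre-sized accumulators by building the flat
-- list of reversed digit rows once and then reading the columns off by index (simpler decomposition;
-- equality of the RETURN value is what is proved).

-- int(d) for a one-character string d, as both Pythons call it inside their loops;
-- exact wherever Python returns a value (Pre_ excludes negative shifted_products, the
-- only admitted inputs on which int(d) would hit '-' and raise ValueError).
def pvDigit (c : Char) : Int := (PySem.Int.ofChars? [c]).getD 0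

-- ===== PORT A =====
def generate_total_column_contributions (intermediate_total_results : List (List (Int × Int))) : List (List Int) × List Int :=
  -- max(len(str(shifted_product)) for results in … for _, shifted_product in results); none = ValueError, excluded by Pre_
  match PySem.List.max? (intermediate_total_results.flatMap (fun results => results.map (fun p => (PySem.Int.toChars p.2).length))) (fun x => x) with
  | none => ([], [])
  | some max_length =>
    -- state = (total_column_contributions, total_columns), updated in place index by index
    intermediate_total_results.foldl (fun st results =>
      (PySem.List.enumerate results 0).foldl (fun st2 ip =>
        -- str(shifted_product).zfill(max_length)[::-1]  ([::-1] is List.reverse, cf. PySem.List.slice?_none_none_neg_one)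
        (PySem.List.enumerate ((PySem.Chars.zfill (PySem.Int.toChars ip.2.2) ((max_length : Nat) : Int)).reverse) 0).foldl
          (fun st3 jd =>
            (st3.1.set jd.1.toNat (st3.1.getD jd.1.toNat [] ++ [pvDigit jd.2]),
             st3.2.set jd.1.toNat (st3.2.getD jd.1.toNat 0 + pvDigit jd.2)))
          st2)
        st)
      (List.replicate max_length ([] : List Int), List.replicate max_length (0 : Int))

-- ===== PORT B =====
def generate_total_column_contributions_alt (intermediate_total_results : List (List (Int × Int))) : List (List Int) × List Int :=
  match PySem.List.max? (intermediate_total_results.flatMap (fun results => results.map (fun p => (PySem.Int.toChars p.2).length))) (fun x => x) with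
  | none => ([], [])
  | some max_length =>
    -- rows = [[int(d) for d in str(sp).zfill(max_length)[::-1]] for results in … for _, sp in results]
    let rows := intermediate_total_results.flatMap (fun results => results.map (fun p =>
      ((PySem.Chars.zfill (PySem.Int.toChars p.2) ((max_length : Nat) : Int)).reverse).map pvDigit))
    -- cols = [[row[j] for row in rows] for j in range(max_length)]  (row[j] is in range: every row has length max_length)
    let cols := (PySem.List.pyRange 0 ((max_length : Nat) : Int) 1).map (fun j => rows.map (fun r => PySem.List.pyGetD r j 0))
    (cols, cols.map (fun c => c.sum))

-- ===== PRECONDITION & SPEC =====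
-- Pre_ excludes exactly the inputs where the Python A raises: an input with no (product, shifted_product)
-- pair at all (max() of an empty generator: ValueError) and inputs with a negative shifted_product
-- (int('-') on the reversed zero-filled string: ValueError).
def Pre_generate_total_column_contributions (intermediate_total_results : List (List (Int × Int))) : Prop :=
  intermediate_total_results.flatMap (fun results => results) ≠ [] ∧
  ∀ results ∈ intermediate_total_results, ∀ p ∈ results, 0 ≤ p.2
instance (intermediate_total_results : List (List (Int × Int))) : Decidable (Pre_generate_total_column_contributions intermediate_total_results) := by unfold Pre_generate_total_column_contributions; infer_instance
def pvWitness_generate_total_column_contributions : (List (List (Int × Int))) := ([[(2, 6), (30, 300)], [(4, 12)]])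
def Spec_generate_total_column_contributions (intermediate_total_results : List (List (Int × Int))) (out : List (List Int) × List Int) : Prop := out = generate_total_column_contributions_alt intermediate_total_results
instance (intermediate_total_results : List (List (Int × Int))) (out : List (List Int) × List Int) : Decidable (Spec_generate_total_column_contributions intermediate_total_results out) := by unfold Spec_generate_total_column_contributions; infer_instance

-- ===== CLAIM (what is proved, stated in full; the proofs are below) =====
def Claim_equal_generate_total_column_contributions : Prop := ∀ (intermediate_total_results : List (List (Int × Int))), Dom_generate_total_column_contributions intermediate_total_results → Pre_generate_total_column_contributions intermediate_total_results → Spec_generate_total_column_contributions intermediate_total_results (generate_total_column_contributions intermediate_total_results)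

-- ===== LEMMAS AND PROOFS =====

-- the reversed zero-filled digit characters of n (str(n).zfill(m)[::-1])
def pvRowChars (m : Nat) (n : Int) : List Char := (PySem.Chars.zfill (PySem.Int.toChars n) (m : Int)).reverse

-- a fold over enumerate that ignores the index is a fold over the list
theorem pv_foldl_enumerate_snd {α β : Type} (l : List α) (h : β → α → β) :
    ∀ (s : Int) (st : β),
      (PySem.List.enumerate l s).foldl (fun a x => h a x.2) st = l.foldl h st := by
  induction l with
  | nil => intro s st; simp [PySem.List.enumerate_nil]
  | cons x t ih => intro s st; simp [PySem.List.enumerate_cons, ih]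

-- A's innermost loop over enumerate(shifted_str): indexwise update of the two accumulators
theorem pv_inner (cs : List Char) :
    ∀ (s : Nat) (A : List (List Int)) (C : List Int),
      A.length = s + cs.length → C.length = s + cs.length →
      (PySem.List.enumerate cs (s : Int)).foldl
        (fun st3 jd =>
          (st3.1.set jd.1.toNat (st3.1.getD jd.1.toNat [] ++ [pvDigit jd.2]),
           st3.2.set jd.1.toNat (st3.2.getD jd.1.toNat 0 + pvDigit jd.2))) (A, C)
      = (A.take s ++ List.zipWith (fun a d => a ++ [d]) (A.drop s) (cs.map pvDigit),
         C.take s ++ List.zipWith (fun a d => a + d) (C.drop s) (cs.map pvDigit)) := by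
  induction cs with
  | nil =>
    intro s A C hA hC
    simp [PySem.List.enumerate_nil]
    simp only [List.length_nil] at hA hC
    omega
  | cons d t ih =>
    intro s A C hA hC
    have hsA : s < A.length := by simp only [List.length_cons] at hA; omega
    have hsC : s < C.length := by simp only [List.length_cons] at hC; omega
    simp only [PySem.List.enumerate_cons, List.foldl_cons, Int.toNat_natCast]
    have hcast : (s : Int) + 1 = ((s + 1 : Nat) : Int) := by push_cast; ring
    rw [hcast, ih (s + 1) (A.set s (A.getD s [] ++ [pvDigit d])) (C.set s (C.getD s 0 + pvDigit d))
          (by simp only [List.length_set]; simp only [List.length_cons] at hA; omega)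
          (by simp only [List.length_set]; simp only [List.length_cons] at hC; omega)]
    simp only [Prod.mk.injEq]
    refine ⟨?_, ?_⟩
    · rw [List.drop_eq_getElem_cons hsA, List.map_cons, List.zipWith_cons_cons]
      rw [List.take_add_one, List.getElem?_set_self (by simpa using hsA)]
      rw [List.take_set_of_le (le_refl s), List.drop_set_of_lt (by omega)]
      simp [List.getElem?_eq_getElem hsA, List.append_assoc]
    · rw [List.drop_eq_getElem_cons hsC, List.map_cons, List.zipWith_cons_cons]
      rw [List.take_add_one, List.getElem?_set_self (by simpa using hsC)]
      rw [List.take_set_of_le (le_refl s), List.drop_set_of_lt (by omega)]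
      simp [List.getElem?_eq_getElem hsC, List.append_assoc]

-- the inner loop over one whole row, started at index 0
theorem pv_inner0 (cs : List Char) (A : List (List Int)) (C : List Int)
    (hA : A.length = cs.length) (hC : C.length = cs.length) :
    (PySem.List.enumerate cs 0).foldl
      (fun st3 jd =>
        (st3.1.set jd.1.toNat (st3.1.getD jd.1.toNat [] ++ [pvDigit jd.2]),
         st3.2.set jd.1.toNat (st3.2.getD jd.1.toNat 0 + pvDigit jd.2))) (A, C)
    = (List.zipWith (fun a d => a ++ [d]) A (cs.map pvDigit),
       List.zipWith (fun a d => a + d) C (cs.map pvDigit)) := by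
  have h := pv_inner cs 0 A C (by simpa using hA) (by simpa using hC)
  simpa using h

-- the fold over the flat list of shifted products is the fold over the digit rows, zipWith-wise
theorem pv_bridge (m : Nat) (sps : List Int) :
    ∀ (A : List (List Int)) (C : List Int),
      (∀ sp ∈ sps, (pvRowChars m sp).length = m) → A.length = m → C.length = m →
      sps.foldl (fun st sp =>
        (PySem.List.enumerate (pvRowChars m sp) 0).foldl
          (fun st3 jd =>
            (st3.1.set jd.1.toNat (st3.1.getD jd.1.toNat [] ++ [pvDigit jd.2]),
             st3.2.set jd.1.toNat (st3.2.getD jd.1.toNat 0 + pvDigit jd.2))) st) (A, C)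
      = sps.foldl (fun st row =>
          (List.zipWith (fun a d => a ++ [d]) st.1 ((pvRowChars m row).map pvDigit),
           List.zipWith (fun a d => a + d) st.2 ((pvRowChars m row).map pvDigit))) (A, C) := by
  induction sps with
  | nil => intro A C _ _ _; rfl
  | cons sp t ih =>
    intro A C hrows hA hC
    have hr : (pvRowChars m sp).length = m := hrows sp (by simp)
    simp only [List.foldl_cons]
    rw [pv_inner0 (pvRowChars m sp) A C (by omega) (by omega)]
    exact ih _ _ (fun x hx => hrows x (by simp [hx])) (by simp [hr, hA]) (by simp [hr, hC])

-- the zipWith fold, read off column by column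
theorem pv_col (rows : List (List Int)) :
    ∀ (A : List (List Int)) (C : List Int),
      (∀ r ∈ rows, r.length = A.length) → C.length = A.length →
      rows.foldl (fun st row =>
          (List.zipWith (fun a d => a ++ [d]) st.1 row,
           List.zipWith (fun a d => a + d) st.2 row)) (A, C)
      = ((List.range A.length).map (fun j => A.getD j [] ++ rows.map (fun r => r.getD j 0)),
         (List.range A.length).map (fun j => C.getD j 0 + (rows.map (fun r => r.getD j 0)).sum)) := by
  induction rows with
  | nil =>
    intro A C _ hC
    simp only [List.foldl_nil, List.map_nil, Prod.mk.injEq]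
    refine ⟨?_, ?_⟩
    · apply List.ext_getElem (by simp)
      intro j h1 h2
      simp only [List.length_map, List.length_range] at h2
      simp [List.getElem?_eq_getElem h2]
    · apply List.ext_getElem (by simp [hC])
      intro j h1 h2
      simp only [List.length_map, List.length_range] at h2
      simp [List.getElem?_eq_getElem (show j < C.length by omega)]
  | cons r t ih =>
    intro A C hrows hC
    have hr : r.length = A.length := hrows r (by simp)
    simp only [List.foldl_cons]
    rw [ih (List.zipWith (fun a d => a ++ [d]) A r) (List.zipWith (fun a d => a + d) C r)
          (by intro x hx; simp [hrows x (by simp [hx]), hr]) (by simp [hr, hC])]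
    have hlen : (List.zipWith (fun (a : List Int) (d : Int) => a ++ [d]) A r).length = A.length := by
      simp [hr]
    rw [hlen]
    simp only [Prod.mk.injEq]
    refine ⟨?_, ?_⟩
    · apply List.map_congr_left
      intro j hj
      simp only [List.mem_range] at hj
      rw [List.getD_eq_getElem _ _ (by simp [hr]; omega), List.getElem_zipWith]
      simp [List.getElem?_eq_getElem (show j < A.length by omega),
            List.getElem?_eq_getElem (show j < r.length by omega), List.append_assoc]
    · apply List.map_congr_left
      intro j hj
      simp only [List.mem_range] at hj
      rw [List.getD_eq_getElem _ _ (by simp [hr, hC]; omega), List.getElem_zipWith]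
      simp [List.getElem?_eq_getElem (show j < C.length by omega),
            List.getElem?_eq_getElem (show j < r.length by omega)]
      ring

-- main lemma: in the branch where max() returned m, A's nested loops compute B's columns
theorem pv_main (xs : List (List (Int × Int))) (m : Nat)
    (hmax : PySem.List.max? (xs.flatMap (fun results => results.map (fun p => (PySem.Int.toChars p.2).length))) (fun x => x) = some m) :
    xs.foldl (fun st results =>
      (PySem.List.enumerate results 0).foldl (fun st2 ip =>
        (PySem.List.enumerate ((PySem.Chars.zfill (PySem.Int.toChars ip.2.2) (m : Int)).reverse) 0).foldl
          (fun st3 jd =>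
            (st3.1.set jd.1.toNat (st3.1.getD jd.1.toNat [] ++ [pvDigit jd.2]),
             st3.2.set jd.1.toNat (st3.2.getD jd.1.toNat 0 + pvDigit jd.2)))
          st2)
        st)
      (List.replicate m ([] : List Int), List.replicate m (0 : Int))
    = ((PySem.List.pyRange 0 (m : Int) 1).map (fun j =>
          (xs.flatMap (fun results => results.map (fun p =>
            ((PySem.Chars.zfill (PySem.Int.toChars p.2) (m : Int)).reverse).map pvDigit))).map
            (fun r => PySem.List.pyGetD r j 0)),
       ((PySem.List.pyRange 0 (m : Int) 1).map (fun j =>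
          (xs.flatMap (fun results => results.map (fun p =>
            ((PySem.Chars.zfill (PySem.Int.toChars p.2) (m : Int)).reverse).map pvDigit))).map
            (fun r => PySem.List.pyGetD r j 0))).map (fun c => c.sum)) := by
  have hfold : ∀ (sp : Int),
      (PySem.Chars.zfill (PySem.Int.toChars sp) (m : Int)).reverse = pvRowChars m sp := fun _ => rfl
  simp only [hfold]
  -- the flat list of shifted products
  have hsps : xs.flatMap (fun r => r.map (fun p => p.2)) = (xs.flatten).map (fun p => p.2) := by
    simp [List.map_flatten, List.flatMap_def]
  -- every admitted shifted product's digit string fits in m characters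
  have hfit : ∀ sp ∈ xs.flatMap (fun r => r.map (fun p => p.2)), (pvRowChars m sp).length = m := by
    intro sp hsp
    have hmem : (PySem.Int.toChars sp).length ∈
        xs.flatMap (fun results => results.map (fun p => (PySem.Int.toChars p.2).length)) := by
      simp only [List.mem_flatMap, List.mem_map] at hsp ⊢
      obtain ⟨r, hr, p, hp, hps⟩ := hsp
      exact ⟨r, hr, p, hp, by rw [hps]⟩
    have hle := PySem.List.max?_isMax hmax _ hmem
    simp only [pvRowChars, List.length_reverse, PySem.Chars.length_zfill, Int.toNat_natCast]
    omega
  -- step 1: collapse A's nested loops into one fold over the flat list of shifted products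
  refine Eq.trans (PySem.List.foldl_congr_mem _ _
      (fun (st : List (List Int) × List Int) (results : List (Int × Int)) =>
        results.foldl (fun st2 p =>
          (PySem.List.enumerate (pvRowChars m p.2) 0).foldl
            (fun st3 jd =>
              (st3.1.set jd.1.toNat (st3.1.getD jd.1.toNat [] ++ [pvDigit jd.2]),
               st3.2.set jd.1.toNat (st3.2.getD jd.1.toNat 0 + pvDigit jd.2))) st2) st) _
      (fun acc results _ => pv_foldl_enumerate_snd results
        (fun st2 p =>
          (PySem.List.enumerate (pvRowChars m p.2) 0).foldl
            (fun st3 jd =>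
              (st3.1.set jd.1.toNat (st3.1.getD jd.1.toNat [] ++ [pvDigit jd.2]),
               st3.2.set jd.1.toNat (st3.2.getD jd.1.toNat 0 + pvDigit jd.2))) st2) 0 acc)) ?_
  rw [← List.foldl_flatten]
  refine Eq.trans (Eq.symm (List.foldl_map (f := fun p : Int × Int => p.2)
      (g := fun (st2 : List (List Int) × List Int) (sp : Int) =>
        (PySem.List.enumerate (pvRowChars m sp) 0).foldl
          (fun st3 jd =>
            (st3.1.set jd.1.toNat (st3.1.getD jd.1.toNat [] ++ [pvDigit jd.2]),
             st3.2.set jd.1.toNat (st3.2.getD jd.1.toNat 0 + pvDigit jd.2))) st2))) ?_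
  rw [← hsps]
  refine Eq.trans (pv_bridge m _ (List.replicate m []) (List.replicate m 0) hfit (by simp) (by simp)) ?_
  refine Eq.trans (Eq.symm (List.foldl_map (f := fun sp => (pvRowChars m sp).map pvDigit)
      (g := fun (st : List (List Int) × List Int) (row : List Int) =>
        (List.zipWith (fun a d => a ++ [d]) st.1 row, List.zipWith (fun a d => a + d) st.2 row)))) ?_
  refine Eq.trans (pv_col ((xs.flatMap (fun r => r.map (fun p => p.2))).map (fun sp => (pvRowChars m sp).map pvDigit))
      (List.replicate m []) (List.replicate m 0)
      (by intro r hr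
          simp only [List.mem_map] at hr
          obtain ⟨sp, hsp, hrr⟩ := hr
          simp [← hrr, hfit sp hsp])
      (by simp)) ?_
  -- step 2: B's rows are the digit rows of the flat list of shifted products
  have hrows : xs.flatMap (fun results => results.map (fun p => (pvRowChars m p.2).map pvDigit))
      = (xs.flatMap (fun r => r.map (fun p => p.2))).map (fun sp => (pvRowChars m sp).map pvDigit) := by
    simp [List.map_flatMap, List.map_map, Function.comp_def]
  rw [hrows, PySem.List.pyRange_zero_natCast, List.map_map, List.map_map]
  simp only [List.length_replicate, Prod.mk.injEq]
  refine ⟨?_, ?_⟩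
  · apply List.map_congr_left
    intro j hj
    simp only [List.mem_range] at hj
    simp only [Function.comp_apply]
    rw [List.getD_eq_getElem _ _ (by simpa using hj), List.getElem_replicate, List.nil_append]
    apply List.map_congr_left
    intro r _
    exact (PySem.List.pyGetD_natCast r j 0).symm
  · apply List.map_congr_left
    intro j hj
    simp only [List.mem_range] at hj
    simp only [Function.comp_apply]
    rw [List.getD_eq_getElem _ _ (by simpa using hj), List.getElem_replicate, zero_add]
    congr 1
    apply List.map_congr_left
    intro r _
    exact (PySem.List.pyGetD_natCast r j 0).symm

-- ===== VERDICT (by name: the statement is the Claim_ definition above) =====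
theorem generate_total_column_contributions_spec : Claim_equal_generate_total_column_contributions := by
  intro xs _ _
  unfold Spec_generate_total_column_contributions
  unfold generate_total_column_contributions generate_total_column_contributions_alt
  cases hmax : PySem.List.max? (xs.flatMap (fun results => results.map (fun p => (PySem.Int.toChars p.2).length))) (fun x => x) with
  | none => rfl
  | some m => exact pv_main xs m hmax
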